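-- pv_equiv track=rewrite | github.com/ThoDon/aiom4b | aiom4b/tagging_service.py | _process_authors
-- ===== SOURCE A (Python) =====
-- from typing import List, Optional, Dict, Any
--
-- def _process_authors(authors_list: List[Dict]) -> str:
--     """Process authors list according to configuration settings."""
--     if not authors_list:
--         return "Unknown Author"
--
--     # Filter out translators
--     translator_keywords = [
--         "traducteur", "traductrice", "translator", "traductor", "traductora",
--         "übersetzer", "übersetzerin", "traduttore", "traduttrice",
--         "翻訳者", "번역가", "переводчик", "переводчица"
--     ]
--
--     filtered_authors = []
--     for author in authors_list:
--         author_name = author.get("name", "").strip()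
--         if not author_name:
--             continue
--
--         # Skip translators
--         is_translator = any(
--             keyword.lower() in author_name.lower()
--             for keyword in translator_keywords
--         )
--         if is_translator:
--             continue
--
--         filtered_authors.append(author_name)
--
--     # If no authors after filtering, return original list
--     if not filtered_authors:
--         filtered_authors = [
--             author.get("name", "").strip()
--             for author in authors_list
--             if author.get("name", "").strip()
--         ]
--
--     return ", ".join(filtered_authors) if filtered_authors else "Unknown Author"
-- ===== SOURCE B (Python) =====
-- from typing import List, Dict
--
-- def _process_authors(authors_list: List[Dict]) -> str:
--     """Process authors list according to configuration settings."""
--     translator_keywords = [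
--         "traducteur", "traductrice", "translator", "traductor", "traductora",
--         "übersetzer", "übersetzerin", "traduttore", "traduttrice",
--         "翻訳者", "번역가", "переводчик", "переводчица"
--     ]
--     # Single pass: build the two comma-joined strings directly as we go.
--     keep = ""   # non-translator names, already joined
--     alln = ""   # every non-empty name, already joined (the fallback)
--     for author in authors_list:
--         name = author.get("name", "").strip()
--         if not name:
--             continue
--         alln = name if not alln else alln + ", " + name
--         if not any(kw.lower() in name.lower() for kw in translator_keywords):
--             keep = name if not keep else keep + ", " + name
--     return keep or alln or "Unknown Author"
-- ===== Notes on version B (the rewrite author's own statement) =====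
-- stated objective: alternative
-- what changed: B makes a single pass that builds the two comma-joined result strings (keepers and the all-names fallback) incrementally as string accumulators, replacing A's list accumulator, str.join, and separately recomputed fallback comprehension.
import Mathlib
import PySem

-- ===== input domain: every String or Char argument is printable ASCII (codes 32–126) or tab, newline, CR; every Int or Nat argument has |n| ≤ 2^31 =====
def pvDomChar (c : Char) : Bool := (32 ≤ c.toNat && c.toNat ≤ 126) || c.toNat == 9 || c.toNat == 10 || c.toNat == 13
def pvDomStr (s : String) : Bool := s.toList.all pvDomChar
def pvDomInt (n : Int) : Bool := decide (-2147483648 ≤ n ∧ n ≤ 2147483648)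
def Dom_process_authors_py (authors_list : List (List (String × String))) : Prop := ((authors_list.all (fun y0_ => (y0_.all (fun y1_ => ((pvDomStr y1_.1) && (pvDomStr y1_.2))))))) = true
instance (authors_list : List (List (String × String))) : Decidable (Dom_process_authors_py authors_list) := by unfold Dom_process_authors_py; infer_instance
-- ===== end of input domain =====

-- B replaces A's list accumulator + join + separately recomputed fallback comprehension by a
-- single pass that builds the two comma-joined result strings (keepers and the fallback)
-- incrementally; objective: alternative decomposition (same cost).

-- shared constant of both Pythons
def pvKeywords : List String :=
  ["traducteur", "traductrice", "translator", "traductor", "traductora",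
   "übersetzer", "übersetzerin", "traduttore", "traduttrice",
   "翻訳者", "번역가", "переводчик", "переводчица"]

-- ===== PORT A =====
-- author.get("name", "").strip()
def pvName (author : List (String × String)) : String :=
  PySem.Str.strip ((PySem.Dict.mk author).getD "name" "")

-- any(keyword.lower() in author_name.lower() for keyword in translator_keywords)
def pvIsTranslator (name : String) : Bool :=
  pvKeywords.any (fun kw => PySem.Str.isIn (PySem.Str.lower kw) (PySem.Str.lower name))

def process_authors_py (authors_list : List (List (String × String))) : String :=
  if authors_list = [] then "Unknown Author"
  else
    let filtered_authors :=
      authors_list.foldl (fun acc author =>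
        let author_name := pvName author
        if author_name = "" then acc
        else if pvIsTranslator author_name then acc
        else acc ++ [author_name]) []
    let filtered_authors :=
      if filtered_authors = [] then
        authors_list.filterMap (fun author =>
          let n := pvName author
          if n = "" then none else some n)
      else filtered_authors
    if filtered_authors ≠ [] then PySem.Str.join ", " filtered_authors
    else "Unknown Author"

-- ===== PORT B =====
-- one pass; state = (keep, alln): the two comma-joined strings built so far
def process_authors_py_alt (authors_list : List (List (String × String))) : String :=
  let p := authors_list.foldl (fun (p : String × String) author =>
      let name := pvName author
      if name = "" then p
      else
        let alln := if p.2 = "" then name else p.2 ++ ", " ++ name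
        let keep :=
          if pvIsTranslator name then p.1
          else if p.1 = "" then name else p.1 ++ ", " ++ name
        (keep, alln)) ("", "")
  if p.1 ≠ "" then p.1 else if p.2 ≠ "" then p.2 else "Unknown Author"

-- ===== PRECONDITION & SPEC =====
def Spec_process_authors_py (authors_list : List (List (String × String))) (out : String) : Prop := out = process_authors_py_alt authors_list
instance (authors_list : List (List (String × String))) (out : String) : Decidable (Spec_process_authors_py authors_list out) := by unfold Spec_process_authors_py; infer_instance

-- ===== CLAIM (what is proved, stated in full; the proofs are below) =====
def Claim_equal_process_authors_py : Prop := ∀ (authors_list : List (List (String × String))), Dom_process_authors_py authors_list → Spec_process_authors_py authors_list (process_authors_py authors_list)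

-- ===== LEMMAS AND PROOFS =====

-- the non-empty stripped names of the list (A's fallback comprehension)
def pvNames (l : List (List (String × String))) : List String :=
  l.filterMap (fun a => let n := pvName a; if n = "" then none else some n)

-- "acc, name" step of B
def pvComb (a n : String) : String := if a = "" then n else a ++ ", " ++ n

theorem pvStr_eq_empty_iff (s : String) : (s = "") ↔ (s.toList = []) :=
  ⟨fun h => by simp [h], fun h => String.toList_inj.mp (by simp [h])⟩

theorem pvStr_ne_empty (s : String) (h : s ≠ "") : s.toList ≠ [] :=
  fun hc => h ((pvStr_eq_empty_iff s).mpr hc)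

-- A's loop builds exactly the translator-free sublist of pvNames
theorem pvLoop_eq (l : List (List (String × String))) (acc : List String) :
    l.foldl (fun acc author =>
        let author_name := pvName author
        if author_name = "" then acc
        else if pvIsTranslator author_name then acc
        else acc ++ [author_name]) acc
    = acc ++ (pvNames l).filter (fun n => !(pvIsTranslator n)) := by
  induction l generalizing acc with
  | nil => simp [pvNames]
  | cons a t ih =>
    simp only [List.foldl_cons, pvNames, List.filterMap_cons]
    by_cases h1 : pvName a = ""
    · simp [h1, ih, pvNames]
    · by_cases h2 : pvIsTranslator (pvName a)
      · simp [h1, h2, ih, pvNames]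
      · simp [h1, h2, ih, pvNames]

-- B's loop computes the two pvComb-folds componentwise
theorem pvFold_eq (l : List (List (String × String))) (p : String × String) :
    l.foldl (fun (p : String × String) author =>
      let name := pvName author
      if name = "" then p
      else
        let alln := if p.2 = "" then name else p.2 ++ ", " ++ name
        let keep :=
          if pvIsTranslator name then p.1
          else if p.1 = "" then name else p.1 ++ ", " ++ name
        (keep, alln)) p
    = (((pvNames l).filter (fun n => !(pvIsTranslator n))).foldl pvComb p.1,
       (pvNames l).foldl pvComb p.2) := by
  induction l generalizing p with
  | nil => simp [pvNames]
  | cons a t ih =>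
    simp only [List.foldl_cons, pvNames, List.filterMap_cons]
    by_cases h1 : pvName a = ""
    · simp [h1, ih, pvNames]
    · by_cases h2 : pvIsTranslator (pvName a)
      · simp [h1, h2, ih, pvNames, pvComb]
      · simp [h1, h2, ih, pvNames, pvComb]

theorem pvComb_ne (ns : List String) (a : String) (ha : a ≠ "") :
    (ns.foldl pvComb a).toList
      = a.toList ++ (ns.map (fun n => ", ".toList ++ n.toList)).flatten := by
  induction ns generalizing a with
  | nil => simp
  | cons n t ih =>
    have hne : (pvComb a n) ≠ "" := by
      simp only [pvComb, if_neg ha]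
      rw [Ne, pvStr_eq_empty_iff]
      simp [pvStr_ne_empty a ha]
    simp only [List.foldl_cons, ih _ hne]
    simp [pvComb, if_neg ha]

theorem pvJoinChars (sep c : List Char) (cs : List (List Char)) :
    PySem.Chars.join sep (c :: cs) = c ++ (cs.map (fun d => sep ++ d)).flatten := by
  induction cs generalizing c with
  | nil => simp [PySem.Chars.join_singleton]
  | cons d cs ih =>
    rw [PySem.Chars.join_cons_cons, ih d]
    simp

theorem pvJoin_toList (n : String) (t : List String) :
    (PySem.Str.join ", " (n :: t)).toList
      = n.toList ++ (t.map (fun m => ", ".toList ++ m.toList)).flatten := by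
  simp only [PySem.Str.toList_join, List.map_cons, pvJoinChars, List.map_map]
  rfl

-- the fold from "" over non-empty names IS ", ".join
theorem pvFoldJoin (ns : List String) (h : ∀ n ∈ ns, n ≠ "") :
    ns.foldl pvComb "" = PySem.Str.join ", " ns := by
  cases ns with
  | nil =>
    apply String.toList_inj.mp
    simp [PySem.Chars.join_nil]
  | cons n t =>
    have hn : n ≠ "" := h n (by simp)
    have hc : pvComb "" n = n := by simp [pvComb]
    apply String.toList_inj.mp
    rw [List.foldl_cons, hc, pvComb_ne t n hn, pvJoin_toList]

theorem pvFold_empty_iff (ns : List String) (h : ∀ n ∈ ns, n ≠ "") :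
    (ns.foldl pvComb "" = "") ↔ ns = [] := by
  cases ns with
  | nil => simp
  | cons n t =>
    have hn : n ≠ "" := h n (by simp)
    have hc : pvComb "" n = n := by simp [pvComb]
    constructor
    · intro hcc
      exfalso
      rw [List.foldl_cons, hc] at hcc
      have := (pvStr_eq_empty_iff _).mp hcc
      rw [pvComb_ne t n hn] at this
      rcases List.append_eq_nil_iff.mp this with ⟨h1, _⟩
      exact pvStr_ne_empty n hn h1
    · intro hcc; cases hcc

theorem pvNames_ne (l : List (List (String × String))) :
    ∀ n ∈ pvNames l, n ≠ "" := by
  intro n hn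
  simp only [pvNames, List.mem_filterMap] at hn
  obtain ⟨a, _, ha⟩ := hn
  by_cases h : pvName a = ""
  · simp [h] at ha
  · simp only [if_neg h] at ha
    cases ha; exact h

-- ===== VERDICT (by name: the statement is the Claim_ definition above) =====
theorem process_authors_py_spec : Claim_equal_process_authors_py := by
  intro l _
  show process_authors_py l = process_authors_py_alt l
  have hNs := pvNames_ne l
  have hKs : ∀ n ∈ (pvNames l).filter (fun n => !(pvIsTranslator n)), n ≠ "" :=
    fun n hn => hNs n (List.mem_of_mem_filter hn)
  unfold process_authors_py process_authors_py_alt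
  simp only [pvLoop_eq, pvFold_eq, List.nil_append]
  set ks := (pvNames l).filter (fun n => !(pvIsTranslator n)) with hks
  by_cases hl : l = []
  · subst hl
    simp [pvNames] at hks
    simp [hks, pvNames]
  · simp only [if_neg hl]
    by_cases hkz : ks = []
    · simp only [hkz, List.foldl_nil, ne_eq, not_true_eq_false, if_false, pvNames]
      by_cases hnz : pvNames l = []
      · simp only [pvNames] at hnz
        simp [hnz]
      · have h1 := pvFoldJoin (pvNames l) hNs
        have h2 := (pvFold_empty_iff (pvNames l) hNs).not.mpr hnz
        have h2' : PySem.Str.join ", " (pvNames l) ≠ "" := h1 ▸ h2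
        simp only [pvNames] at h1 h2 h2' hnz
        simp [hnz, h1, h2']
    · have h1 := pvFoldJoin ks hKs
      have h2 := (pvFold_empty_iff ks hKs).not.mpr hkz
      have h2' : PySem.Str.join ", " ks ≠ "" := h1 ▸ h2
      simp [hkz, h1, h2']
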